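-- pv_equiv track=rewrite | github.com/huyvan47/search-engine | rag/reasoning/multi_hop.py | decide_recovery_branch
-- ===== SOURCE A (Python) =====
-- def decide_recovery_branch(any_tags):
--     if any(t.startswith("pest:") for t in any_tags):
--         return "pest"
--     if any(t.startswith("disease:") for t in any_tags):
--         return "disease"
--     if any(t.startswith("weed:") for t in any_tags):
--         return "weed"
--     return "unknown"
-- ===== SOURCE B (Python) =====
-- def decide_recovery_branch(any_tags):
--     saw_disease = False
--     saw_weed = False
--     for t in any_tags:
--         if t.startswith("pest:"):
--             return "pest"
--         if t.startswith("disease:"):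
--             saw_disease = True
--         elif t.startswith("weed:"):
--             saw_weed = True
--     if saw_disease:
--         return "disease"
--     if saw_weed:
--         return "weed"
--     return "unknown"
-- ===== Notes on version B (the rewrite author's own statement) =====
-- stated objective: alternative
-- what changed: Replaced A's three separate any() scans over the list with a single pass that early-returns 'pest' and records disease/weed flags, deciding disease/weed/unknown after the loop.
import Mathlib
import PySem

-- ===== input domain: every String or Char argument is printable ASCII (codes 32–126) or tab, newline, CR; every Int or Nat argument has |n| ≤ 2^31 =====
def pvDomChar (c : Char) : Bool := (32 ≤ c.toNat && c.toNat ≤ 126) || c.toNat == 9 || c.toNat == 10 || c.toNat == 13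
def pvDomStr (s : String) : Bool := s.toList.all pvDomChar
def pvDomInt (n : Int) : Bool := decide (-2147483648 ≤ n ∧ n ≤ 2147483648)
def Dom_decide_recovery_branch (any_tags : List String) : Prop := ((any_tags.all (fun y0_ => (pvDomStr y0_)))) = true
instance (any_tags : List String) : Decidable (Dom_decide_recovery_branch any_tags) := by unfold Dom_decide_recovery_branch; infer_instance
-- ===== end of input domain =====

-- B replaces A's three any() scans by a single pass with an early return for 'pest' and flags for disease/weed.

-- ===== PORT A =====
def decide_recovery_branch (any_tags : List String) : String :=
  if any_tags.any (fun t => PySem.Str.startswith t "pest:") then "pest"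
  else if any_tags.any (fun t => PySem.Str.startswith t "disease:") then "disease"
  else if any_tags.any (fun t => PySem.Str.startswith t "weed:") then "weed"
  else "unknown"

-- ===== PORT B =====
def decideLoop (xs : List String) (saw_disease saw_weed : Bool) : String :=
  match xs with
  | [] =>
    if saw_disease then "disease"
    else if saw_weed then "weed"
    else "unknown"
  | t :: rest =>
    if PySem.Str.startswith t "pest:" then "pest"
    else if PySem.Str.startswith t "disease:" then decideLoop rest true saw_weed
    else if PySem.Str.startswith t "weed:" then decideLoop rest saw_disease true
    else decideLoop rest saw_disease saw_weed

def decide_recovery_branch_alt (any_tags : List String) : String :=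
  decideLoop any_tags false false

-- ===== PRECONDITION & SPEC =====
def Spec_decide_recovery_branch (any_tags : List String) (out : String) : Prop := out = decide_recovery_branch_alt any_tags
instance (any_tags : List String) (out : String) : Decidable (Spec_decide_recovery_branch any_tags out) := by unfold Spec_decide_recovery_branch; infer_instance

-- ===== CLAIM (what is proved, stated in full; the proofs are below) =====
def Claim_equal_decide_recovery_branch : Prop := ∀ (any_tags : List String), Dom_decide_recovery_branch any_tags → Spec_decide_recovery_branch any_tags (decide_recovery_branch any_tags)

-- ===== LEMMAS AND PROOFS =====

-- Characterisation of B's loop: with flags sd/sw it returns what A's scan of the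
-- remaining list decides, with the flags ORed in.
theorem decideLoop_eq (xs : List String) (sd sw : Bool) :
    decideLoop xs sd sw =
      if xs.any (fun t => PySem.Str.startswith t "pest:") then "pest"
      else if sd || xs.any (fun t => PySem.Str.startswith t "disease:") then "disease"
      else if sw || xs.any (fun t => PySem.Str.startswith t "weed:") then "weed"
      else "unknown" := by
  induction xs generalizing sd sw with
  | nil => simp [decideLoop]
  | cons t rest ih =>
    simp only [decideLoop, List.any_cons]
    by_cases hp : PySem.Str.startswith t "pest:" = true
    · simp only [hp]
      simp
    · have hp' : PySem.Str.startswith t "pest:" = false := by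
        simpa using hp
      by_cases hd : PySem.Str.startswith t "disease:" = true
      · simp only [hp', hd, ih]
        simp
      · have hd' : PySem.Str.startswith t "disease:" = false := by
          simpa using hd
        by_cases hw : PySem.Str.startswith t "weed:" = true
        · simp only [hp', hd', hw, ih]
          simp
        · have hw' : PySem.Str.startswith t "weed:" = false := by
            simpa using hw
          simp only [hp', hd', hw', ih]
          simp

-- ===== VERDICT (by name: the statement is the Claim_ definition above) =====
theorem decide_recovery_branch_spec : Claim_equal_decide_recovery_branch := by
  intro any_tags _
  unfold Spec_decide_recovery_branch decide_recovery_branch_alt decide_recovery_branch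
  rw [decideLoop_eq]
  simp
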